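-- pv_equiv track=rewrite | github.com/dhruvhaldar/FOAMFlask | backend/security.py | is_safe_command
-- ===== SOURCE A (Python) =====
-- def is_safe_command(command: str) -> bool:
--     """
--     Validate command input to prevent shell injection and ReDoS.
--
--     Args:
--         command: User-provided command string
--
--     Returns:
--         True if command is safe, False otherwise
--     """
--     if not command or not isinstance(command, str):
--         return False
--
--     if len(command) > 100:
--         return False
--
--     dangerous_chars = [';', '&', '|', '`', '$', '(', ')', '<', '>', '"', "'"]
--     if any(char in command for char in dangerous_chars):
--         return False
--
--     if '..' in command:
--         return False
--
--     return True
-- ===== SOURCE B (Python) =====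
-- def is_safe_command(command: str) -> bool:
--     """Single-pass validation: same guards, then one stateful scan over the
--     characters that rejects dangerous characters and consecutive dots."""
--     if not command or not isinstance(command, str):
--         return False
--
--     if len(command) > 100:
--         return False
--
--     dangerous = {';', '&', '|', '`', '$', '(', ')', '<', '>', '"', "'"}
--     prev = None
--     for c in command:
--         if c in dangerous:
--             return False
--         if prev == '.' and c == '.':
--             return False
--         prev = c
--     return True
-- ===== Notes on version B (the rewrite author's own statement) =====
-- stated objective: alternative
-- what changed: Replaced the eleven per-character full-string membership scans plus the separate consecutive-dot substring search with a single stateful pass that tracks the previous character.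
import Mathlib
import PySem

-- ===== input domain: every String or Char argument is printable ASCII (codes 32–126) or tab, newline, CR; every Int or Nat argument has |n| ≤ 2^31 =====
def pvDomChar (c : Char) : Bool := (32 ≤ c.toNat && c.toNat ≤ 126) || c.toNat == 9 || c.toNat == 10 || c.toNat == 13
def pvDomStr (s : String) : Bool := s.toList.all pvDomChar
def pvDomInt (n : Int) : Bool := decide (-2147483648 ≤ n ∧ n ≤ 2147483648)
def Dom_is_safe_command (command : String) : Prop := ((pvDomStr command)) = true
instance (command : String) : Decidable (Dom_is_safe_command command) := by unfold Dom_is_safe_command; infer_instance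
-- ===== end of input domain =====

-- B merges A's eleven per-character membership scans and the '..' substring search
-- into one stateful pass over the characters (objective: alternative decomposition).

-- ===== PORT A =====
def pvDangerousChars : List String := [";", "&", "|", "`", "$", "(", ")", "<", ">", "\"", "'"]

def is_safe_command (command : String) : Bool :=
  if PySem.Str.len command == 0 then false
  else if 100 < PySem.Str.len command then false
  else if pvDangerousChars.any (fun ch => PySem.Str.isIn ch command) then false
  else if PySem.Str.isIn ".." command then false
  else true

-- ===== PORT B =====
def pvDangSet : List Char := [';', '&', '|', '`', '$', '(', ')', '<', '>', '"', '\'']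

def pvAltLoop : List Char → Option Char → Bool
  | [], _ => true
  | c :: rest, prev =>
    if pvDangSet.contains c then false
    else if prev == some '.' && c == '.' then false
    else pvAltLoop rest (some c)

def is_safe_command_alt (command : String) : Bool :=
  if PySem.Str.len command == 0 then false
  else if 100 < PySem.Str.len command then false
  else pvAltLoop command.toList none

-- ===== PRECONDITION & SPEC =====
def Spec_is_safe_command (command : String) (out : Bool) : Prop := out = is_safe_command_alt command
instance (command : String) (out : Bool) : Decidable (Spec_is_safe_command command out) := by unfold Spec_is_safe_command; infer_instance

-- ===== CLAIM (what is proved, stated in full; the proofs are below) =====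
def Claim_equal_is_safe_command : Prop := ∀ (command : String), Dom_is_safe_command command → Spec_is_safe_command command (is_safe_command command)

-- ===== LEMMAS AND PROOFS =====

-- [a] is an infix of l iff a is an element of l
theorem pv_singleton_infix {α : Type} {a : α} {l : List α} : [a] <:+: l ↔ a ∈ l := by
  constructor
  · rintro ⟨s, t, rfl⟩; simp
  · intro h
    obtain ⟨s, t, rfl⟩ := List.append_of_mem h
    exact ⟨s, t, by simp⟩

-- two consecutive dots, structurally
def pvHasDD : List Char → Bool
  | [] => false
  | c :: rest => (c == '.' && rest.head? == some '.') || pvHasDD rest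

theorem pvHasDD_iff (l : List Char) : pvHasDD l = true ↔ ['.', '.'] <:+: l := by
  induction l with
  | nil => simp [pvHasDD]
  | cons c rest ih =>
    simp only [pvHasDD, Bool.or_eq_true, Bool.and_eq_true, beq_iff_eq, ih,
      List.infix_cons_iff]
    constructor
    · rintro (⟨rfl, hh⟩ | h)
      · left
        cases rest with
        | nil => simp at hh
        | cons d r =>
          simp only [List.head?_cons, Option.some.injEq] at hh
          subst hh
          exact ⟨r, by simp⟩
      · right; exact h
    · rintro (⟨t, ht⟩ | h)
      · left
        cases rest with
        | nil =>
          have := congrArg List.length ht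
          simp at this
        | cons d r =>
          simp only [List.cons_append, List.cons.injEq] at ht
          obtain ⟨rfl, rfl, _⟩ := ht
          simp
      · right; exact h

-- the single-pass loop equals "no dangerous char, no '..', and no dot continuing a previous dot"
theorem pvAltLoop_eq (l : List Char) (prev : Option Char) :
    pvAltLoop l prev =
      (l.all (fun c => !pvDangSet.contains c) && !pvHasDD l
        && !(prev == some '.' && l.head? == some '.')) := by
  induction l generalizing prev with
  | nil => simp [pvAltLoop, pvHasDD]
  | cons c rest ih =>
    simp only [pvAltLoop, ih, pvHasDD, List.all_cons, List.head?_cons]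
    cases hdc : pvDangSet.contains c <;>
      cases hcd : c == '.' <;>
        cases hpd : prev == some '.' <;>
          simp [hcd, Bool.and_comm, Bool.and_left_comm, Bool.and_assoc]

theorem pv_isIn_singleton (c : Char) (l : List Char) :
    PySem.Chars.isIn [c] l = l.contains c := by
  rw [Bool.eq_iff_iff, PySem.Chars.isIn_iff_infix, pv_singleton_infix]
  simp

-- A's dangerous-char scan equals B's per-character check
theorem pv_dang_eq (l : List Char) :
    pvDangerousChars.any (fun ch => PySem.Chars.isIn ch.toList l)
      = l.any (fun c => pvDangSet.contains c) := by
  have e : pvDangerousChars.map String.toList = pvDangSet.map (fun c => [c]) := by decide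
  calc pvDangerousChars.any (fun ch => PySem.Chars.isIn ch.toList l)
      = (pvDangerousChars.map String.toList).any (fun cl => PySem.Chars.isIn cl l) := by
        simp [Function.comp_def]
    _ = (pvDangSet.map (fun c => [c])).any (fun cl => PySem.Chars.isIn cl l) := by rw [e]
    _ = pvDangSet.any (fun c => PySem.Chars.isIn [c] l) := by
        simp [Function.comp_def]
    _ = pvDangSet.any (fun c => l.contains c) := by
        rw [Bool.eq_iff_iff]
        simp only [List.any_eq_true]
        constructor
        · rintro ⟨c, hc, h⟩; exact ⟨c, hc, by rwa [← pv_isIn_singleton]⟩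
        · rintro ⟨c, hc, h⟩; exact ⟨c, hc, by rwa [pv_isIn_singleton]⟩
    _ = l.any (fun c => pvDangSet.contains c) := by
        rw [Bool.eq_iff_iff]
        simp only [List.any_eq_true, List.contains_eq_mem, decide_eq_true_eq]
        exact ⟨fun ⟨c, h1, h2⟩ => ⟨c, h2, h1⟩, fun ⟨c, h1, h2⟩ => ⟨c, h2, h1⟩⟩

-- ===== VERDICT (by name: the statement is the Claim_ definition above) =====
theorem is_safe_command_spec : Claim_equal_is_safe_command := by
  intro command _
  unfold Spec_is_safe_command is_safe_command is_safe_command_alt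
  have hdd : PySem.Str.isIn ".." command = pvHasDD command.toList := by
    rw [Bool.eq_iff_iff, PySem.Str.isIn_iff_infix, pvHasDD_iff]
    have h2 : ("..".toList : List Char) = ['.', '.'] := by decide
    rw [h2]
  have hdang : pvDangerousChars.any (fun ch => PySem.Str.isIn ch command)
      = command.toList.any (fun c => pvDangSet.contains c) := by
    have hfun : (fun ch => PySem.Str.isIn ch command)
        = (fun ch : String => PySem.Chars.isIn ch.toList command.toList) := by
      funext ch; simp
    rw [hfun, pv_dang_eq]
  have hall : command.toList.all (fun c => !pvDangSet.contains c)
      = !command.toList.any (fun c => pvDangSet.contains c) := by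
    simp [List.all_eq_not_any_not]
  split_ifs with h0 h1 h2 h3
  · rfl
  · rfl
  · rw [hdang] at h2
    rw [pvAltLoop_eq, hall, h2]
    simp
  · rw [hdd] at h3
    rw [pvAltLoop_eq, h3]
    simp
  · rw [hdang, Bool.not_eq_true] at h2
    rw [hdd, Bool.not_eq_true] at h3
    rw [pvAltLoop_eq, hall, h2, h3]
    simp
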